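-- pv_equiv track=rewrite | github.com/Sam-the-Unwise/Bot_Detector | cosine_comparison_II.py | separate_like_comments_into_dict
-- ===== SOURCE A (Python) =====
-- def separate_like_comments_into_dict(general_list_of_comments):
--     lengths_aleady_found = []
--     dict_of_comments = {}
--
--     for item in general_list_of_comments:
--         # if this is a new length, create a new key:value pair
--         if len(item) not in lengths_aleady_found:
--             dict_of_comments[len(item)] = [item]
--             lengths_aleady_found.append(len(item))
--
--         # if this isn't a new length, update the existing key's value
--         else:
--             current_list_of_comments = dict_of_comments.get(len(item))
--             dict_of_comments[len(item)] = current_list_of_comments + [item]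
--
--     return dict_of_comments
-- ===== SOURCE B (Python) =====
-- def separate_like_comments_into_dict(general_list_of_comments):
--     distinct_lengths = list(dict.fromkeys(len(c) for c in general_list_of_comments))
--     return {L: [c for c in general_list_of_comments if len(c) == L]
--             for L in distinct_lengths}
-- ===== Notes on version B (the rewrite author's own statement) =====
-- stated objective: simpler
-- what changed: Replaces A's single stateful pass (seen-lengths list plus incremental dict updates that re-concatenate the growing group list) with two stateless staged passes: dedup the lengths in first-occurrence order via dict.fromkeys, then a dict comprehension that collects each length's comments with a filter pass; this also removes A's quadratic per-group copying.
import Mathlib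
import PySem

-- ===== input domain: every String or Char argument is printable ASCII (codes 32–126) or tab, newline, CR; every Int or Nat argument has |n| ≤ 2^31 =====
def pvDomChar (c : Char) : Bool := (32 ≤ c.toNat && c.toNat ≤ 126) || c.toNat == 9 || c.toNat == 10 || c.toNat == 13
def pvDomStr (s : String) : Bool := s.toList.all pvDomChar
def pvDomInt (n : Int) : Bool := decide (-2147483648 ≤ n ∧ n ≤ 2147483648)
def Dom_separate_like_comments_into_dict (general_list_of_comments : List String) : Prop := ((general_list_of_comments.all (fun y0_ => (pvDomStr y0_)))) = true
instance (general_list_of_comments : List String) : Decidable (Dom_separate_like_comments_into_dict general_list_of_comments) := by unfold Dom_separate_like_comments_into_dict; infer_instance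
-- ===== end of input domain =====

-- B replaces A's single stateful pass (seen-lengths list + incremental dict updates) with two
-- stateless staged passes: dedup the lengths, then a dict comprehension filtering per length (simpler).

-- ===== PORT A =====
-- state: (lengths_aleady_found, dict_of_comments)
def separate_like_comments_into_dict (general_list_of_comments : List String) : List (Int × List String) :=
  (general_list_of_comments.foldl
    (fun (st : List Int × PySem.Dict Int (List String)) item =>
      if PySem.Str.len item ∉ st.1 then
        (st.1 ++ [PySem.Str.len item], st.2.insert (PySem.Str.len item) [item])
      else
        -- dict.get(len(item)) : the key is present whenever this branch runs, so the [] default is never used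
        (st.1, st.2.insert (PySem.Str.len item) (st.2.getD (PySem.Str.len item) [] ++ [item])))
    ([], PySem.Dict.empty)).2.items

-- ===== PORT B =====
-- distinct_lengths = list(dict.fromkeys(len(c) for c in gl)); then the dict comprehension,
-- built key by key in distinct_lengths order, each value a filter comprehension over gl
def separate_like_comments_into_dict_alt (general_list_of_comments : List String) : List (Int × List String) :=
  ((PySem.List.dedup (general_list_of_comments.map (fun c => PySem.Str.len c))).foldl
    (fun (d : PySem.Dict Int (List String)) L =>
      d.insert L (general_list_of_comments.filter (fun c => PySem.Str.len c == L)))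
    PySem.Dict.empty).items

-- ===== PRECONDITION & SPEC =====
def Spec_separate_like_comments_into_dict (general_list_of_comments : List String) (out : List (Int × List String)) : Prop := out = separate_like_comments_into_dict_alt general_list_of_comments
instance (general_list_of_comments : List String) (out : List (Int × List String)) : Decidable (Spec_separate_like_comments_into_dict general_list_of_comments out) := by unfold Spec_separate_like_comments_into_dict; infer_instance

-- ===== CLAIM (what is proved, stated in full; the proofs are below) =====
def Claim_equal_separate_like_comments_into_dict : Prop := ∀ (general_list_of_comments : List String), Dom_separate_like_comments_into_dict general_list_of_comments → Spec_separate_like_comments_into_dict general_list_of_comments (separate_like_comments_into_dict general_list_of_comments)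

-- ===== LEMMAS AND PROOFS =====

-- loop invariant for A: the seen-lengths list holds exactly the dict's keys; under it, A's fold
-- computes the same dict as the plain grouping fold 'd.modify (len item) [] (· ++ [item])'
theorem pv_fold_eq (l : List String) (seen : List Int) (d : PySem.Dict Int (List String))
    (hinv : ∀ L : Int, L ∈ seen ↔ d.contains L = true) :
    (l.foldl
      (fun (st : List Int × PySem.Dict Int (List String)) item =>
        if PySem.Str.len item ∉ st.1 then
          (st.1 ++ [PySem.Str.len item], st.2.insert (PySem.Str.len item) [item])
        else
          (st.1, st.2.insert (PySem.Str.len item) (st.2.getD (PySem.Str.len item) [] ++ [item])))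
      (seen, d)).2
    = l.foldl
      (fun (d : PySem.Dict Int (List String)) item =>
        d.modify (PySem.Str.len item) [] (fun l => l ++ [item])) d := by
  induction l generalizing seen d with
  | nil => rfl
  | cons item rest ih =>
    simp only [List.foldl_cons]
    by_cases h : PySem.Str.len item ∈ seen
    · have hc : d.contains (PySem.Str.len item) = true := (hinv _).mp h
      rw [if_neg (by simpa using h)]
      have hm : d.modify (PySem.Str.len item) [] (fun l => l ++ [item])
          = d.insert (PySem.Str.len item) (d.getD (PySem.Str.len item) [] ++ [item]) := by
        simp [PySem.Dict.modify]
      rw [← hm]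
      exact ih seen _ (by
        intro L
        rw [hinv L, PySem.Dict.contains_modify]
        constructor
        · intro hL; simp [hL]
        · intro hL
          rcases (by simpa using hL) with hL | hL
          · rw [hL]; exact hc
          · exact hL)
    · have hc : d.contains (PySem.Str.len item) = false := by
        by_contra hco
        exact h ((hinv _).mpr (by simpa using hco))
      rw [if_pos h]
      have hm : d.modify (PySem.Str.len item) [] (fun l => l ++ [item])
          = d.insert (PySem.Str.len item) [item] := by
        simp only [PySem.Dict.modify]
        rw [PySem.Dict.getD_of_not_contains d [] hc, List.nil_append]
      rw [← hm]
      exact ih (seen ++ [PySem.Str.len item]) _ (by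
        intro L
        rw [PySem.Dict.contains_modify]
        constructor
        · intro hL
          rcases List.mem_append.mp hL with hL | hL
          · simp [(hinv L).mp hL]
          · simp [List.mem_singleton.mp hL]
        · intro hL
          rcases (by simpa using hL) with hL | hL
          · exact List.mem_append.mpr (Or.inr (by simp [hL]))
          · exact List.mem_append.mpr (Or.inl ((hinv L).mpr hL)))

-- the grouping fold's value at any key: all comments of that length, in order
theorem pv_groupfold_getD (gl : List String) (L : Int) :
    (gl.foldl (fun (d : PySem.Dict Int (List String)) item =>
        d.modify (PySem.Str.len item) [] (fun l => l ++ [item])) PySem.Dict.empty).getD L []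
    = gl.filter (fun c => PySem.Str.len c == L) := by
  have h := PySem.Dict.getD_foldl_modify_append
      (l := gl.map (fun c => (PySem.Str.len c, c))) (d := PySem.Dict.empty) (c := L)
  rw [List.foldl_map] at h
  simpa [List.filter_map, Function.comp_def, List.map_map] using h

-- ===== VERDICT (by name: the statement is the Claim_ definition above) =====
theorem separate_like_comments_into_dict_spec : Claim_equal_separate_like_comments_into_dict := by
  intro gl _
  unfold Spec_separate_like_comments_into_dict separate_like_comments_into_dict separate_like_comments_into_dict_alt
  rw [pv_fold_eq gl [] PySem.Dict.empty (by intro L; simp [PySem.Dict.contains_empty])]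
  -- A's dict: keys are the dedup'd lengths, values the filtered groups
  set D := gl.foldl (fun (d : PySem.Dict Int (List String)) item =>
      d.modify (PySem.Str.len item) [] (fun l => l ++ [item])) PySem.Dict.empty with hD
  have hkeys : D.keys = PySem.Set.ofList (gl.map (fun c => PySem.Str.len c)) := by
    rw [hD, PySem.Dict.keys_foldl_modify_key (key := fun c => PySem.Str.len c)]
    simp [PySem.Dict.keys_empty, PySem.Set.update_nil_left]
  have hnd : D.keys.Nodup := by rw [hkeys]; exact PySem.Set.nodup_ofList _
  rw [PySem.Dict.items_eq_map_keys D hnd [], hkeys]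
  -- B's dict: inserts over fresh distinct keys append in order
  rw [PySem.List.dedup_eq_ofList,
    PySem.Dict.items_foldl_insert_fresh
      (l := PySem.Set.ofList (gl.map (fun c => PySem.Str.len c)))
      (k := fun L => L)
      (v := fun L => gl.filter (fun c => PySem.Str.len c == L))
      (d := PySem.Dict.empty)
      (fun a _ => PySem.Dict.contains_empty a)
      (by simp [PySem.Set.nodup_ofList])]
  simp only [PySem.Dict.empty, List.nil_append]
  exact List.map_congr_left (fun L _ => by rw [hD, pv_groupfold_getD])
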